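-- pv_equiv track=rewrite | github.com/6GeniusTurtle9/TIL | 공부/이러닝/25지각벌금적게내기.py | min_fee
-- ===== SOURCE A (Python) =====
-- def min_fee(pages_to_print):
--     i = len(pages_to_print)
--     pages = sorted(pages_to_print)
--     result = 0
--     for page in pages:
--         result += i * page
--         i -= 1
--     return result
-- ===== SOURCE B (Python) =====
-- def min_fee(pages_to_print):
--     # No sorting: the fine equals sum(pages) plus the sum of min(x, y) over
--     # all unordered pairs (each page is counted once per page it is <= to,
--     # which reproduces the (n - position) multiplier of the sorted order).
--     result = sum(pages_to_print)
--     rest = pages_to_print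
--     while rest:
--         x = rest[0]
--         rest = rest[1:]
--         for y in rest:
--             result += min(x, y)
--     return result
-- ===== Notes on version B (the rewrite author's own statement) =====
-- stated objective: alternative
-- what changed: Eliminates sorting entirely: B computes sum(pages) plus the sum of min(x,y) over all unordered pairs, an order-free pairwise formulation equal to A's sorted weighted sum.
import Mathlib
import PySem

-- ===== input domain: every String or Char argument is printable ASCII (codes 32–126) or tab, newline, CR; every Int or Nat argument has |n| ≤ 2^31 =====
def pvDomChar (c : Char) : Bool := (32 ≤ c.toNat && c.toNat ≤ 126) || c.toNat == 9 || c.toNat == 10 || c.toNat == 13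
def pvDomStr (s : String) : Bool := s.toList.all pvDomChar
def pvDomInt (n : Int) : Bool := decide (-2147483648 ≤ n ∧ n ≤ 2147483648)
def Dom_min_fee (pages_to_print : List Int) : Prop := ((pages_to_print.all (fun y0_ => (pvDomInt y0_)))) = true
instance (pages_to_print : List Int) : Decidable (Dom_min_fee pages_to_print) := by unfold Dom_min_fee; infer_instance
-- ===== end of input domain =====

-- B drops the sort altogether: fee = sum(pages) + sum of min over all unordered pairs (alternative algorithm, O(n^2), not faster).

-- ===== PORT A =====
-- loop state: (i, result); result += i * page; i -= 1
def minFeeLoopA : Int → Int → List Int → Int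
  | _, result, [] => result
  | i, result, page :: ps => minFeeLoopA (i - 1) (result + i * page) ps

def min_fee (pages_to_print : List Int) : Int :=
  minFeeLoopA (pages_to_print.length : Int) 0
    (PySem.List.sorted pages_to_print (fun x => x) false)

-- ===== PORT B =====
-- outer while: pop the head x, add min x y for every y in the remaining tail
def minFeeAltLoop : Int → List Int → Int
  | result, [] => result
  | result, x :: rest => minFeeAltLoop (rest.foldl (fun a y => a + min x y) result) rest

def min_fee_alt (pages_to_print : List Int) : Int :=
  minFeeAltLoop pages_to_print.sum pages_to_print

-- ===== PRECONDITION & SPEC =====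
def Spec_min_fee (pages_to_print : List Int) (out : Int) : Prop := out = min_fee_alt pages_to_print
instance (pages_to_print : List Int) (out : Int) : Decidable (Spec_min_fee pages_to_print out) := by unfold Spec_min_fee; infer_instance

-- ===== CLAIM =====
def Claim_equal_min_fee : Prop := ∀ (pages_to_print : List Int), Dom_min_fee pages_to_print → Spec_min_fee pages_to_print (min_fee pages_to_print)

-- ===== LEMMAS AND PROOFS =====

-- sum of min x y over a list
def minsTo (x : Int) (l : List Int) : Int := (l.map (fun y => min x y)).sum

-- sum of min over all unordered pairs, in list order
def pairMins : List Int → Int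
  | [] => 0
  | x :: rest => minsTo x rest + pairMins rest

theorem foldl_add_map (f : Int → Int) (l : List Int) : ∀ c, l.foldl (fun a y => a + f y) c = c + (l.map f).sum := by
  induction l with
  | nil => intro c; simp
  | cons y ys ih => intro c; simp [List.foldl, ih]; ring

theorem minFeeAltLoop_eq (l : List Int) : ∀ r, minFeeAltLoop r l = r + pairMins l := by
  induction l with
  | nil => intro r; simp [minFeeAltLoop, pairMins]
  | cons x rest ih =>
      intro r
      simp only [minFeeAltLoop, pairMins]
      rw [foldl_add_map, ih]
      simp [minsTo]; ring

theorem minsTo_perm {x : Int} {l l' : List Int} (h : l.Perm l') : minsTo x l = minsTo x l' := by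
  unfold minsTo
  exact List.Perm.sum_eq (h.map _)

theorem pairMins_perm {l l' : List Int} (h : l.Perm l') : pairMins l = pairMins l' := by
  induction h with
  | nil => rfl
  | cons x h ih => simp only [pairMins, ih, minsTo_perm h]
  | swap x y l =>
      simp only [pairMins, minsTo, List.map_cons, List.sum_cons]
      rw [min_comm y x]; ring
  | trans _ _ ih1 ih2 => exact ih1.trans ih2

theorem minFeeLoopA_r_add (l : List Int) : ∀ i r x, minFeeLoopA i (r + x) l = minFeeLoopA i r l + x := by
  induction l with
  | nil => intro i r x; simp [minFeeLoopA]
  | cons p ps ih =>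
      intro i r x
      simp only [minFeeLoopA]
      rw [show r + x + i * p = (r + i * p) + x by ring, ih]

theorem minsTo_of_le {x : Int} {l : List Int} (h : ∀ y ∈ l, x ≤ y) : minsTo x l = x * l.length := by
  induction l with
  | nil => simp [minsTo]
  | cons y ys ih =>
      have hx : x ≤ y := h y (List.mem_cons_self ..)
      have := ih (fun z hz => h z (List.mem_cons_of_mem _ hz))
      simp only [minsTo, List.map_cons, List.sum_cons, min_eq_left hx] at *
      rw [this, List.length_cons]; push_cast; ring

theorem minFeeLoopA_sorted (l : List Int) (h : l.Pairwise (· ≤ ·)) :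
    minFeeLoopA (l.length : Int) 0 l = l.sum + pairMins l := by
  induction l with
  | nil => simp [minFeeLoopA, pairMins]
  | cons p ps ih =>
      rcases List.pairwise_cons.mp h with ⟨hp, hps⟩
      simp only [minFeeLoopA, List.length_cons, zero_add]
      have h1 : ((ps.length + 1 : Nat) : Int) - 1 = (ps.length : Int) := by push_cast; ring
      rw [h1, show ((ps.length + 1 : Nat) : Int) * p = 0 + ((ps.length + 1 : Nat) : Int) * p by ring,
        minFeeLoopA_r_add, ih hps]
      simp only [pairMins, List.sum_cons, minsTo_of_le hp]
      push_cast; ring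

-- ===== VERDICT =====
theorem min_fee_spec : Claim_equal_min_fee := by
  intro l _
  unfold Spec_min_fee min_fee min_fee_alt
  have hperm : (PySem.List.sorted l (fun x => x) false).Perm l := PySem.List.sorted_perm ..
  have hpw : (PySem.List.sorted l (fun x => x) false).Pairwise (· ≤ ·) := by
    simpa using PySem.List.sorted_pairwise l (fun x => x)
  rw [← PySem.List.length_sorted l (fun x => x) false,
    minFeeLoopA_sorted _ hpw, minFeeAltLoop_eq, hperm.sum_eq, pairMins_perm hperm]
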